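-- pv_equiv track=rewrite | github.com/HaroonZia123/hill-climbing | possibleStates.py | count_successors
-- ===== SOURCE A (Python) =====
-- def count_successors(state):
--     """Count the total number of successors for a given state."""
--     n = len(state)
--     total_successors = 0
--
--     for row in range(n):
--         for col in range(n):
--             if state[row] != col:
--                 total_successors += 1
--
--     return total_successors
-- ===== SOURCE B (Python) =====
-- def count_successors(state):
--     """Count the total number of successors for a given state."""
--     n = len(state)
--     return n * n - sum(1 for v in state if 0 <= v < n)
-- ===== Notes on version B (the rewrite author's own statement) =====
-- stated objective: faster
-- what changed: Replaced the nested row/column counting loops by the closed form n*n minus the number of entries v with 0 <= v < n, computed in one pass.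
import Mathlib
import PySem

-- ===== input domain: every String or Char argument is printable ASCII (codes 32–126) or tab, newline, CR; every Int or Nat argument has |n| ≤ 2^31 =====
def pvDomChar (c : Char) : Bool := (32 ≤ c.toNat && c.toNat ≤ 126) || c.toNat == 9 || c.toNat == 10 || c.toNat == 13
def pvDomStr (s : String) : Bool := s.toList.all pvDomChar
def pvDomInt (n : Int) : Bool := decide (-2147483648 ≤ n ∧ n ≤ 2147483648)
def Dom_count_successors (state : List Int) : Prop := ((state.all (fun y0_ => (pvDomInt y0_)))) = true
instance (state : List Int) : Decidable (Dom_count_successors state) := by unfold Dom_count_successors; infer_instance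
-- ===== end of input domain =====

-- B replaces A's nested O(n^2) counting loops by the closed form n*n minus a one-pass count (faster, asymptotic).

-- ===== PORT A =====
def count_successors (state : List Int) : Int :=
  let n : Int := state.length
  (PySem.List.pyRange 0 n 1).foldl (fun total row =>
    (PySem.List.pyRange 0 n 1).foldl (fun t col =>
      if PySem.List.pyGetD state row 0 ≠ col then t + 1 else t) total) 0

-- ===== PORT B =====
def count_successors_alt (state : List Int) : Int :=
  let n : Int := state.length
  n * n - (state.countP (fun v => decide (0 ≤ v ∧ v < n)) : Int)

-- ===== PRECONDITION & SPEC =====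
def Spec_count_successors (state : List Int) (out : Int) : Prop := out = count_successors_alt state
instance (state : List Int) (out : Int) : Decidable (Spec_count_successors state out) := by unfold Spec_count_successors; infer_instance

-- ===== CLAIM (what is proved, stated in full; the proofs are below) =====
def Claim_equal_count_successors : Prop := ∀ (state : List Int), Dom_count_successors state → Spec_count_successors state (count_successors state)

-- ===== LEMMAS AND PROOFS =====

-- inner loop: 'for col in range(n): if v != col: t += 1'
lemma pv_inner (n : Int) (hn : 0 ≤ n) (v t : Int) :
    (PySem.List.pyRange 0 n 1).foldl (fun t col => if v ≠ col then t + 1 else t) t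
      = t + n - (if 0 ≤ v ∧ v < n then 1 else 0) := by
  induction n, hn using Int.le_induction generalizing t with
  | base =>
    rw [PySem.List.pyRange_one_eq_nil le_rfl]
    simp only [List.foldl_nil]
    have : ¬ (0 ≤ v ∧ v < 0) := by omega
    simp [this]
  | succ m hm ih =>
    rw [PySem.List.pyRange_one_succ_right hm, List.foldl_append]
    simp only [List.foldl_cons, List.foldl_nil, ih]
    by_cases hvm : v = m
    · subst hvm
      have h1 : ¬ (0 ≤ v ∧ v < v) := by omega
      have h2 : 0 ≤ v ∧ v < v + 1 := by omega
      simp [h2]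
      ring
    · have h3 : (0 ≤ v ∧ v < m + 1) ↔ (0 ≤ v ∧ v < m) := by omega
      simp only [ne_eq, hvm, not_false_eq_true, if_true, h3]
      ring

-- outer loop over the elements of xs, folding the inner closed form
lemma pv_outer (n : Int) (xs : List Int) (acc : Int) :
    xs.foldl (fun total v => total + n - (if 0 ≤ v ∧ v < n then 1 else 0)) acc
      = acc + n * xs.length - (xs.countP (fun v => decide (0 ≤ v ∧ v < n)) : Int) := by
  induction xs generalizing acc with
  | nil => simp
  | cons x t ih =>
    simp only [List.foldl_cons, ih, List.length_cons, List.countP_cons]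
    by_cases h : 0 ≤ x ∧ x < n
    · simp [h]; ring
    · simp [h]; ring

-- ===== VERDICT (by name: the statement is the Claim_ definition above) =====
theorem count_successors_spec : Claim_equal_count_successors := by
  intro state _
  unfold Spec_count_successors count_successors count_successors_alt
  simp only
  rw [show (fun total row =>
      (PySem.List.pyRange 0 (state.length : Int) 1).foldl (fun t col =>
        if PySem.List.pyGetD state row 0 ≠ col then t + 1 else t) total)
    = (fun total row => total + (state.length : Int)
        - (if 0 ≤ PySem.List.pyGetD state row 0 ∧ PySem.List.pyGetD state row 0 < (state.length : Int) then 1 else 0))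
    from funext fun total => funext fun row => pv_inner _ (by positivity) _ _]
  rw [PySem.List.foldl_pyRange_zero_pyGetD' state 0
      (fun total v => total + (state.length : Int) - (if 0 ≤ v ∧ v < (state.length : Int) then 1 else 0)) 0]
  rw [pv_outer]
  ring
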